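-- pv_equiv track=rewrite | github.com/sertione/sqlmodel-mypy-plugin | tests/mypy/test_mypy.py | group_cases_by_config
-- ===== SOURCE A (Python) =====
-- from collections import defaultdict
--
-- def group_cases_by_config(cases: list[tuple[str, str]]) -> dict[str, list[str]]:
--     """Convert (config, module) cases to config -> [modules] mapping."""
--     by_config: dict[str, list[str]] = defaultdict(list)
--     for config_filename, python_filename in cases:
--         by_config[config_filename].append(python_filename)
--
--     # Preserve order, avoid duplicates.
--     out: dict[str, list[str]] = {}
--     for config_filename, python_filenames in by_config.items():
--         seen: set[str] = set()
--         deduped: list[str] = []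
--         for python_filename in python_filenames:
--             if python_filename in seen:
--                 continue
--             seen.add(python_filename)
--             deduped.append(python_filename)
--         out[config_filename] = deduped
--     return out
-- ===== SOURCE B (Python) =====
-- def group_cases_by_config(cases: list[tuple[str, str]]) -> dict[str, list[str]]:
--     """Convert (config, module) cases to config -> [modules] mapping."""
--     out: dict[str, list[str]] = {}
--     seen: set[tuple[str, str]] = set()
--     for config_filename, python_filename in cases:
--         if (config_filename, python_filename) not in seen:
--             seen.add((config_filename, python_filename))
--             out.setdefault(config_filename, []).append(python_filename)
--     return out
-- ===== Notes on version B (the rewrite author's own statement) =====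
-- stated objective: simpler
-- what changed: Single pass over cases with a dict and a set of (config, module) pairs, deduping while grouping; the intermediate by_config grouping dict and the per-config dedup loop are gone.
import Mathlib
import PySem

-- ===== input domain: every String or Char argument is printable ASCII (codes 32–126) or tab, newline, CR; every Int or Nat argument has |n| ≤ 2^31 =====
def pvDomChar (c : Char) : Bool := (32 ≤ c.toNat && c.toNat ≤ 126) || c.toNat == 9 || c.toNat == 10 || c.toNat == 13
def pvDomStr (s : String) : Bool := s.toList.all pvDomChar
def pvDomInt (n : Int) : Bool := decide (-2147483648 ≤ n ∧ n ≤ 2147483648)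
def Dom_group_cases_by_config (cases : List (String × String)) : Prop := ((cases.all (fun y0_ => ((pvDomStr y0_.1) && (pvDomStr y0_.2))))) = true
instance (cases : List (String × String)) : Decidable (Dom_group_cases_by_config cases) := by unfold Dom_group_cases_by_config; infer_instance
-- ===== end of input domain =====

-- B replaces A's two-stage group-then-dedup with a single pass keeping a dict and a set of
-- (config, module) pairs; same return value, objective: simpler.

-- ===== PORT A =====
-- A's inner dedup loop over one module list: state (seen, deduped).
def pvDedup (ms : List String) : PySem.Set String × List String :=
  ms.foldl (fun st m =>
      if PySem.Set.contains st.1 m then st else (st.1.add m, st.2 ++ [m]))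
    ((PySem.Set.empty : PySem.Set String), ([] : List String))

-- literal port of A: a grouping fold (defaultdict append), then a second fold over its items
-- inserting the deduped list for each config.
def group_cases_by_config (cases : List (String × String)) : List (String × List String) :=
  let by_config : PySem.Dict String (List String) :=
    cases.foldl (fun d p => d.modify p.1 [] (fun ms => ms ++ [p.2])) PySem.Dict.empty
  let out : PySem.Dict String (List String) :=
    by_config.items.foldl (fun o ci => o.insert ci.1 (pvDedup ci.2).2) PySem.Dict.empty
  out.items

-- ===== PORT B =====
-- literal port of Source B: one fold over cases; 'out.setdefault(c, []).append(m)' is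
-- Dict.modify c [] (· ++ [m]), i.e. d[c] = d.get(c, []) + [m].
def group_cases_by_config_alt (cases : List (String × String)) : List (String × List String) :=
  let st := cases.foldl (fun st p =>
      if PySem.Set.contains st.2 p then st
      else (st.1.modify p.1 [] (fun ms => ms ++ [p.2]), PySem.Set.add st.2 p))
    ((PySem.Dict.empty : PySem.Dict String (List String)), (PySem.Set.empty : PySem.Set (String × String)))
  st.1.items

-- ===== PRECONDITION & SPEC =====
def Spec_group_cases_by_config (cases : List (String × String)) (out : List (String × List String)) : Prop := out = group_cases_by_config_alt cases
instance (cases : List (String × String)) (out : List (String × List String)) : Decidable (Spec_group_cases_by_config cases out) := by unfold Spec_group_cases_by_config; infer_instance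

-- ===== CLAIM (what is proved, stated in full; the proofs are below) =====
def Claim_equal_group_cases_by_config : Prop := ∀ (cases : List (String × String)), Dom_group_cases_by_config cases → Spec_group_cases_by_config cases (group_cases_by_config cases)

-- ===== LEMMAS AND PROOFS =====

-- canonical value both ports are reduced to: configs in first-occurrence order, each with its
-- modules deduped in first-occurrence order.
def pvCanon (cases : List (String × String)) : List (String × List String) :=
  (PySem.Set.ofList (cases.map Prod.fst)).map
    (fun c => (c, PySem.Set.ofList ((cases.filter (fun p => p.1 == c)).map Prod.snd)))

-- A's (seen, deduped) pair stays equal componentwise and is Set.update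
theorem pvDedup_pair (ms : List String) (s : PySem.Set String) :
    ms.foldl (fun st m =>
        if PySem.Set.contains st.1 m then st else (st.1.add m, st.2 ++ [m])) (s, s)
      = (PySem.Set.update s ms, PySem.Set.update s ms) := by
  induction ms generalizing s with
  | nil => simp [PySem.Set.update]
  | cons m ms ih =>
    rw [List.foldl_cons, PySem.Set.update_cons]
    by_cases h : m ∈ s
    · have hc : PySem.Set.contains s m = true := (PySem.Set.contains_iff s m).mpr h
      rw [if_pos hc, PySem.Set.add_of_mem h]
      exact ih s
    · have hc : ¬ PySem.Set.contains s m = true := fun hm => h ((PySem.Set.contains_iff s m).mp hm)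
      rw [if_neg hc, PySem.Set.add_of_not_mem h]
      exact ih (s ++ [m])

theorem pvDedup_snd (ms : List String) : (pvDedup ms).2 = PySem.Set.ofList ms := by
  unfold pvDedup
  have := pvDedup_pair ms []
  simp only [PySem.Set.empty] at *
  rw [this, PySem.Set.update_nil_left]

theorem pvA_eq_canon (cases : List (String × String)) :
    group_cases_by_config cases = pvCanon cases := by
  unfold group_cases_by_config
  show ((cases.foldl (fun d p => d.modify p.1 [] (fun ms => ms ++ [p.2]))
      PySem.Dict.empty).items.foldl
      (fun o ci => o.insert ci.1 (pvDedup ci.2).2) PySem.Dict.empty).items = pvCanon cases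
  set D := cases.foldl (fun d p => d.modify p.1 [] (fun ms => ms ++ [p.2]))
    (PySem.Dict.empty : PySem.Dict String (List String)) with hD
  have hk : D.keys = PySem.Set.ofList (cases.map Prod.fst) := by
    rw [hD, PySem.Dict.keys_foldl_modify_key cases Prod.fst []
      (fun _ p => fun ms => ms ++ [p.2]) PySem.Dict.empty]
    simp [PySem.Set.update_nil_left]
  have hnd : D.keys.Nodup := by rw [hk]; exact PySem.Set.nodup_ofList _
  have hitems : D.items = (PySem.Set.ofList (cases.map Prod.fst)).map
      (fun c => (c, (cases.filter (fun p => p.1 == c)).map Prod.snd)) := by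
    rw [PySem.Dict.items_eq_map_keys D hnd [], hk]
    refine List.map_congr_left fun c _ => ?_
    rw [hD, PySem.Dict.getD_foldl_modify_append]
    simp
  rw [hitems]
  have hins := PySem.Dict.items_foldl_insert_fresh
    ((PySem.Set.ofList (cases.map Prod.fst)).map
      (fun c => (c, (cases.filter (fun p => p.1 == c)).map Prod.snd)))
    (fun ci => ci.1) (fun ci => (pvDedup ci.2).2)
    (PySem.Dict.empty : PySem.Dict String (List String)) (fun a _ => by simp)
    (by
      have h' : List.map (fun ci : String × List String => ci.1)
          ((PySem.Set.ofList (cases.map Prod.fst)).map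
            (fun c => (c, (cases.filter (fun p => p.1 == c)).map Prod.snd)))
          = PySem.Set.ofList (cases.map Prod.fst) := by
        rw [List.map_map]; exact List.map_id' _
      rw [h']
      exact PySem.Set.nodup_ofList _)
  rw [hins]
  unfold pvCanon
  simp only [PySem.Dict.empty, List.nil_append, List.map_map]
  exact List.map_congr_left fun c _ => by simp [pvDedup_snd]

-- the single-pass fold step of B, named for the invariant proof (defeq to the port's lambda)
def pvBfn (st : PySem.Dict String (List String) × PySem.Set (String × String))
    (p : String × String) :
    PySem.Dict String (List String) × PySem.Set (String × String) :=
  if PySem.Set.contains st.2 p then st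
  else (st.1.modify p.1 [] (fun ms => ms ++ [p.2]), PySem.Set.add st.2 p)

-- invariant of B's single pass: keys, per-key value, and the seen set after any prefix
theorem pvB_inv (l : List (String × String)) :
    (l.foldl pvBfn (PySem.Dict.empty, PySem.Set.empty)).1.keys
        = PySem.Set.ofList (l.map Prod.fst)
    ∧ (∀ c, (l.foldl pvBfn (PySem.Dict.empty, PySem.Set.empty)).1.getD c []
        = PySem.Set.ofList ((l.filter (fun p => p.1 == c)).map Prod.snd))
    ∧ (l.foldl pvBfn (PySem.Dict.empty, PySem.Set.empty)).2 = PySem.Set.ofList l := by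
  induction l using List.reverseRecOn with
  | nil => refine ⟨by simp [PySem.Dict.keys_empty], fun c => by simp [PySem.Dict.getD_empty], by simp⟩
  | append_singleton l p ih =>
    obtain ⟨hk, hg, hs⟩ := ih
    rw [List.foldl_append, List.foldl_cons, List.foldl_nil]
    by_cases hp : p ∈ l
    · have hc : PySem.Set.contains (l.foldl pvBfn (PySem.Dict.empty, PySem.Set.empty)).2 p = true := by
        rw [hs]; exact (PySem.Set.contains_iff _ _).mpr ((PySem.Set.mem_ofList _ _).mpr hp)
      rw [pvBfn, if_pos hc]
      refine ⟨?_, fun c => ?_, ?_⟩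
      · rw [hk, List.map_append, List.map_cons, List.map_nil, PySem.Set.ofList_append_singleton,
          PySem.Set.add_of_mem ((PySem.Set.mem_ofList _ _).mpr (List.mem_map_of_mem hp))]
      · rw [hg c, List.filter_append]
        by_cases hc1 : p.1 = c
        · have : List.filter (fun p => p.1 == c) [p] = [p] := by simp [hc1]
          rw [this, List.map_append, List.map_cons, List.map_nil,
            PySem.Set.ofList_append_singleton, PySem.Set.add_of_mem]
          exact (PySem.Set.mem_ofList _ _).mpr
            (List.mem_map_of_mem (List.mem_filter.mpr ⟨hp, by simp [hc1]⟩))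
        · have : List.filter (fun p => p.1 == c) [p] = [] := by simp [hc1]
          rw [this, List.append_nil]
      · rw [hs, PySem.Set.ofList_append_singleton,
          PySem.Set.add_of_mem ((PySem.Set.mem_ofList _ _).mpr hp)]
    · have hc : PySem.Set.contains (l.foldl pvBfn (PySem.Dict.empty, PySem.Set.empty)).2 p = false := by
        rw [hs]
        simpa using fun hm => hp ((PySem.Set.mem_ofList _ _).mp ((PySem.Set.contains_iff _ _).mp hm))
      rw [pvBfn, if_neg (by rw [hc]; simp)]
      refine ⟨?_, fun c => ?_, ?_⟩
      · rw [PySem.Dict.keys_modify, List.map_append, List.map_cons, List.map_nil,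
          PySem.Set.ofList_append_singleton]
        by_cases hm : p.1 ∈ l.map Prod.fst
        · have hcon : (l.foldl pvBfn (PySem.Dict.empty, PySem.Set.empty)).1.contains p.1 = true := by
            rw [PySem.Dict.contains_eq_decide_mem_keys, hk]
            simpa using (PySem.Set.mem_ofList _ _).mpr hm
          rw [PySem.Dict.keys_insert_of_contains _ _ hcon, hk,
            PySem.Set.add_of_mem ((PySem.Set.mem_ofList _ _).mpr hm)]
        · have hcon : (l.foldl pvBfn (PySem.Dict.empty, PySem.Set.empty)).1.contains p.1 = false := by
            rw [PySem.Dict.contains_eq_decide_mem_keys, hk]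
            simpa using fun h => hm ((PySem.Set.mem_ofList _ _).mp h)
          rw [PySem.Dict.keys_insert_of_not_contains _ _ hcon, hk,
            PySem.Set.add_of_not_mem (fun h => hm ((PySem.Set.mem_ofList _ _).mp h))]
      · rw [PySem.Dict.getD_modify, List.filter_append]
        by_cases hc1 : c = p.1
        · rw [if_pos hc1, hg p.1]
          have : List.filter (fun q => q.1 == c) [p] = [p] := by simp [hc1]
          rw [this, List.map_append, List.map_cons, List.map_nil,
            PySem.Set.ofList_append_singleton, hc1, PySem.Set.add_of_not_mem]
          intro hmem
          rcases List.mem_map.mp ((PySem.Set.mem_ofList _ _).mp hmem) with ⟨q, hqf, hq2⟩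
          rcases List.mem_filter.mp hqf with ⟨hql, hq1⟩
          have hq1' : q.1 = p.1 := by simpa using hq1
          exact hp (by
            have : q = p := Prod.ext hq1' hq2
            rwa [this] at hql)
        · rw [if_neg hc1, hg c]
          have : List.filter (fun q => q.1 == c) [p] = [] := by
            simp
            exact fun h => hc1 h.symm
          rw [this, List.append_nil]
      · rw [hs, PySem.Set.ofList_append_singleton]

theorem pvB_eq_canon (cases : List (String × String)) :
    group_cases_by_config_alt cases = pvCanon cases := by
  unfold group_cases_by_config_alt
  show (cases.foldl pvBfn (PySem.Dict.empty, PySem.Set.empty)).1.items = pvCanon cases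
  obtain ⟨hk, hg, _⟩ := pvB_inv cases
  rw [PySem.Dict.items_eq_map_keys _ (by rw [hk]; exact PySem.Set.nodup_ofList _) [], hk]
  exact List.map_congr_left fun c _ => by rw [hg c]

-- ===== VERDICT (by name: the statement is the Claim_ definition above) =====
theorem group_cases_by_config_spec : Claim_equal_group_cases_by_config := by
  intro cases _
  unfold Spec_group_cases_by_config
  rw [pvA_eq_canon, pvB_eq_canon]
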